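-- pv_equiv track=rewrite | github.com/qtn-grd/PYTHON_MODULES_42 | PM03/ex5/ft_data_stream.py | game_event_stream
-- ===== SOURCE A (Python) =====
-- from typing import Generator
--
-- def game_event_stream(n: int) -> Generator[tuple[str, int, str], None, None]:
--     """Generate a stream of game events for multiple players with individual
--     levels."""
--
--     level: int = 1
--     players: list[str] = ["alice", "bob", "charlie"]
--     player_iter = iter(players)
--
--     for x in range(1, n + 1):
--
--         try:
--             player = next(player_iter)
--         except StopIteration:
--             player_iter = iter(players)
--             player = next(player_iter)
--
--         if x % 5 == 0:
--             action = "leveled up!"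
--             level += 1
--         elif x % 3 == 1:
--             action = "found treasure!"
--         else:
--             action = "killed monster!"
--
--         yield player, level, action
-- ===== SOURCE B (Python) =====
-- from typing import Generator
--
-- # The event pattern repeats with period 15 (lcm of the player cycle 3 and the
-- # level cycle 5): tile one precomputed literal block of 15 (player, level
-- # offset, action) entries, bumping the level base by the block's start // 5.
-- _BLOCK = [
--     ("alice",   0, "found treasure!"),
--     ("bob",     0, "killed monster!"),
--     ("charlie", 0, "killed monster!"),
--     ("alice",   0, "found treasure!"),
--     ("bob",     1, "leveled up!"),
--     ("charlie", 1, "killed monster!"),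
--     ("alice",   1, "found treasure!"),
--     ("bob",     1, "killed monster!"),
--     ("charlie", 1, "killed monster!"),
--     ("alice",   2, "leveled up!"),
--     ("bob",     2, "killed monster!"),
--     ("charlie", 2, "killed monster!"),
--     ("alice",   2, "found treasure!"),
--     ("bob",     2, "killed monster!"),
--     ("charlie", 3, "leveled up!"),
-- ]
--
-- def game_event_stream(n: int) -> Generator[tuple[str, int, str], None, None]:
--     """Generate a stream of game events by tiling the period-15 event table."""
--     for b in range(0, n, 15):
--         base = 1 + b // 5
--         for player, off, action in _BLOCK[: n - b]:
--             yield player, base + off, action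
-- ===== Notes on version B (the rewrite author's own statement) =====
-- stated objective: alternative
-- what changed: B replaces A's per-event computation (mutable level counter, resettable player iterator, three-way branch per index) with a table-driven tiling: the events repeat with period 15 (lcm of the 3-player cycle and the 5-step level cycle), so B tiles one precomputed literal block of 15 (player, level-offset, action) entries, adding a level base of 1 + block_start//5 per block.
import Mathlib
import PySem

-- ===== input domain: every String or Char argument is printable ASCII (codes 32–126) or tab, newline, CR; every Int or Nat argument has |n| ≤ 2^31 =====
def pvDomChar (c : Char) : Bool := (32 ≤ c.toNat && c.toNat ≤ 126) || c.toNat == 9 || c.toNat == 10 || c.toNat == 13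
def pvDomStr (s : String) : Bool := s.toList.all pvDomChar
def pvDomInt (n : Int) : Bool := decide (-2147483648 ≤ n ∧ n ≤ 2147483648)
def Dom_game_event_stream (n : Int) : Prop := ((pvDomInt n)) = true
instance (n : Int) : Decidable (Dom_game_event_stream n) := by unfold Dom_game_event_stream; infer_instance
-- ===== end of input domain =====

-- B replaces A's per-event loop (mutable level counter, resettable player iterator,
-- per-index branch) with a table-driven tiling of the period-15 event pattern;
-- objective: alternative. A is a Python generator; equivalence is about the list
-- of yielded tuples.

-- ===== PORT A =====
-- the loop body, with the running state: current level and the remaining iterator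
-- (the iterator is modelled by the list of players not yet yielded; the [] case is
-- A's StopIteration reset: fresh iter(players), take its first element)
def gesLoopA : List Int → Int → List String → List (String × Int × String)
  | [], _, _ => []
  | x :: xs, level, it =>
    let (player, it') :=
      match it with
      | p :: rest => (p, rest)
      | [] => ("alice", ["bob", "charlie"])
    if PySem.Int.mod x 5 = 0 then
      (player, level + 1, "leveled up!") :: gesLoopA xs (level + 1) it'
    else if PySem.Int.mod x 3 = 1 then
      (player, level, "found treasure!") :: gesLoopA xs level it'
    else
      (player, level, "killed monster!") :: gesLoopA xs level it'

def game_event_stream (n : Int) : List (String × Int × String) :=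
  gesLoopA (PySem.List.pyRange 1 (n + 1) 1) 1 ["alice", "bob", "charlie"]

-- ===== PORT B =====
-- the literal period-15 table of (player, level offset, action) from Source B
def gesBlock : List (String × Int × String) :=
  [("alice",   0, "found treasure!"),
   ("bob",     0, "killed monster!"),
   ("charlie", 0, "killed monster!"),
   ("alice",   0, "found treasure!"),
   ("bob",     1, "leveled up!"),
   ("charlie", 1, "killed monster!"),
   ("alice",   1, "found treasure!"),
   ("bob",     1, "killed monster!"),
   ("charlie", 1, "killed monster!"),
   ("alice",   2, "leveled up!"),
   ("bob",     2, "killed monster!"),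
   ("charlie", 2, "killed monster!"),
   ("alice",   2, "found treasure!"),
   ("bob",     2, "killed monster!"),
   ("charlie", 3, "leveled up!")]

-- Source B's outer loop: for b in range(0, n, 15), yield the shifted entries of _BLOCK[:n-b]
def game_event_stream_alt (n : Int) : List (String × Int × String) :=
  (PySem.List.pyRange 0 n 15).foldl
    (fun acc b =>
      let base := 1 + PySem.Int.floordiv b 5
      acc ++ (PySem.List.slice gesBlock none (some (n - b))).map
        (fun e => (e.1, base + e.2.1, e.2.2)))
    []

-- ===== PRECONDITION & SPEC =====
def Spec_game_event_stream (n : Int) (out : List (String × Int × String)) : Prop := out = game_event_stream_alt n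
instance (n : Int) (out : List (String × Int × String)) : Decidable (Spec_game_event_stream n out) := by unfold Spec_game_event_stream; infer_instance

-- ===== CLAIM (what is proved, stated in full; the proofs are below) =====
def Claim_equal_game_event_stream : Prop := ∀ (n : Int), Dom_game_event_stream n → Spec_game_event_stream n (game_event_stream n)

-- ===== LEMMAS AND PROOFS =====

-- the event at index x, computed in closed form (proof-only helper: both ports are
-- proved equal to (pyRange 1 (n+1) 1).map gesEvent)
def gesEvent (x : Int) : String × Int × String :=
  let action :=
    if PySem.Int.mod x 5 = 0 then "leveled up!"
    else if PySem.Int.mod x 3 = 1 then "found treasure!"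
    else "killed monster!"
  (PySem.List.pyGetD ["alice", "bob", "charlie"] (PySem.Int.mod (x - 1) 3) "",
   1 + PySem.Int.floordiv x 5, action)

-- floor division by 5 when crossing to a multiple of 5 / not crossing
lemma ges_fd_succ_eq (k : Int) (h5 : PySem.Int.mod (k + 1) 5 = 0) :
    PySem.Int.floordiv (k + 1) 5 = PySem.Int.floordiv k 5 + 1 := by
  rw [PySem.Int.floordiv_eq_ediv_of_pos (by norm_num),
      PySem.Int.floordiv_eq_ediv_of_pos (by norm_num)]
  rw [PySem.Int.mod_eq_emod_of_pos (by norm_num)] at h5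
  omega

lemma ges_fd_succ_ne (k : Int) (h5 : PySem.Int.mod (k + 1) 5 ≠ 0) :
    PySem.Int.floordiv (k + 1) 5 = PySem.Int.floordiv k 5 := by
  rw [PySem.Int.floordiv_eq_ediv_of_pos (by norm_num),
      PySem.Int.floordiv_eq_ediv_of_pos (by norm_num)]
  rw [PySem.Int.mod_eq_emod_of_pos (by norm_num)] at h5
  omega

lemma ges_mod3_succ (k r : Int) (h : PySem.Int.mod k 3 = r) :
    PySem.Int.mod (k + 1) 3 = if r = 2 then 0 else r + 1 := by
  rw [PySem.Int.mod_eq_emod_of_pos (by norm_num)] at h ⊢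
  split_ifs with h2 <;> omega

-- A's loop invariant: after k iterations the level is 1 + k // 5 and the iterator
-- holds the players not yet taken in the current cycle ([] only when it just ended)
lemma ges_main (m : Nat) : ∀ (k : Int) (it : List String),
    (it = (["alice", "bob", "charlie"] : List String).drop (PySem.Int.mod k 3).toNat
      ∨ (PySem.Int.mod k 3 = 0 ∧ it = [])) →
    gesLoopA (PySem.List.pyRange (k + 1) (k + 1 + (m : Int)) 1) (1 + PySem.Int.floordiv k 5) it
      = (PySem.List.pyRange (k + 1) (k + 1 + (m : Int)) 1).map gesEvent := by
  induction m with
  | zero =>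
    intro k it _
    have h : k + 1 + ((0 : Nat) : Int) = k + 1 := by push_cast; ring
    rw [h]
    simp [pysem, gesLoopA]
  | succ m ih =>
    intro k it hit
    have hcons : PySem.List.pyRange (k + 1) (k + 1 + ((m + 1 : Nat) : Int)) 1
        = (k + 1) :: PySem.List.pyRange (k + 1 + 1) (k + 1 + ((m + 1 : Nat) : Int)) 1 :=
      PySem.List.pyRange_one_cons (by push_cast; omega)
    have hrange : PySem.List.pyRange (k + 1 + 1) (k + 1 + ((m + 1 : Nat) : Int)) 1
        = PySem.List.pyRange ((k + 1) + 1) ((k + 1) + 1 + (m : Int)) 1 := by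
      congr 1; push_cast; ring
    have hr0 : 0 ≤ PySem.Int.mod k 3 := PySem.Int.mod_nonneg k (by norm_num)
    have hr3 : PySem.Int.mod k 3 < 3 := PySem.Int.mod_lt k (by norm_num)
    have hr : PySem.Int.mod k 3 = 0 ∨ PySem.Int.mod k 3 = 1 ∨ PySem.Int.mod k 3 = 2 := by omega
    have hstep : ∀ lvl rest,
        gesLoopA ((k + 1) :: rest) lvl it
          = (PySem.List.pyGetD ["alice", "bob", "charlie"] (PySem.Int.mod k 3) "",
              if PySem.Int.mod (k + 1) 5 = 0 then lvl + 1 else lvl,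
              if PySem.Int.mod (k + 1) 5 = 0 then "leveled up!"
              else if PySem.Int.mod (k + 1) 3 = 1 then "found treasure!"
              else "killed monster!")
            :: gesLoopA rest (if PySem.Int.mod (k + 1) 5 = 0 then lvl + 1 else lvl)
                 (if PySem.Int.mod k 3 = 2 then ([] : List String)
                  else (["alice", "bob", "charlie"] : List String).drop
                        ((PySem.Int.mod k 3).toNat + 1)) := by
      intro lvl rest
      rcases hit with hit | ⟨hz, hit⟩
      · rcases hr with h | h | h <;> rw [hit, h] <;>
          norm_num [gesLoopA, PySem.List.pyGetD, PySem.List.pyIdx?] <;>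
          split_ifs <;> simp
      · rw [hit, hz]
        norm_num [gesLoopA, PySem.List.pyGetD, PySem.List.pyIdx?]
        split_ifs <;> simp
    rw [hcons, hstep, List.map_cons]
    have hlvl : (if PySem.Int.mod (k + 1) 5 = 0
          then (1 + PySem.Int.floordiv k 5) + 1 else 1 + PySem.Int.floordiv k 5)
        = 1 + PySem.Int.floordiv (k + 1) 5 := by
      by_cases h5 : PySem.Int.mod (k + 1) 5 = 0
      · rw [if_pos h5, ges_fd_succ_eq k h5]; ring
      · rw [if_neg h5, ges_fd_succ_ne k h5]
    have hhead : gesEvent (k + 1)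
        = (PySem.List.pyGetD ["alice", "bob", "charlie"] (PySem.Int.mod k 3) "",
            if PySem.Int.mod (k + 1) 5 = 0 then (1 + PySem.Int.floordiv k 5) + 1
            else 1 + PySem.Int.floordiv k 5,
            if PySem.Int.mod (k + 1) 5 = 0 then "leveled up!"
            else if PySem.Int.mod (k + 1) 3 = 1 then "found treasure!"
            else "killed monster!") := by
      simp only [gesEvent]
      rw [show k + 1 - 1 = k from by ring, ← hlvl]
    rw [hhead]
    congr 1
    rw [hlvl, hrange]
    apply ih
    rcases hr with h | h | h
    · left
      rw [ges_mod3_succ k 0 h, h, if_neg (by norm_num)]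
      decide
    · left
      rw [ges_mod3_succ k 1 h, h, if_neg (by norm_num)]
      decide
    · exact Or.inr ⟨by rw [ges_mod3_succ k 2 h]; norm_num, by rw [if_pos h]⟩

-- A = map gesEvent
lemma ges_A_eq_map (n : Int) :
    game_event_stream n = (PySem.List.pyRange 1 (n + 1) 1).map gesEvent := by
  unfold game_event_stream
  by_cases hn : 0 ≤ n
  · have hw := ges_main n.toNat 0 ["alice", "bob", "charlie"] (Or.inl (by decide))
    have e1 : (0 : Int) + 1 = 1 := by norm_num
    have e2 : (0 : Int) + 1 + (n.toNat : Int) = n + 1 := by omega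
    have e3 : (1 : Int) + PySem.Int.floordiv 0 5 = 1 := by decide
    rw [e2, e1, e3] at hw
    exact hw
  · have h : PySem.List.pyRange 1 (n + 1) 1 = [] :=
      PySem.List.pyRange_one_eq_nil (by omega)
    rw [h]; rfl

-- the table is exactly the first period of gesEvent, level shifted down by 1
lemma ges_block_eq :
    gesBlock = (List.range 15).map
      (fun j : Nat => ((gesEvent (1 + (j : Int))).1, (gesEvent (1 + (j : Int))).2.1 - 1,
        (gesEvent (1 + (j : Int))).2.2)) := by
  decide

-- shifting by a multiple of 15 only shifts the level, by b // 5
lemma ges_shift (b x : Int) (hdvd : (15 : Int) ∣ b) :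
    gesEvent (b + x)
      = ((gesEvent x).1, PySem.Int.floordiv b 5 + (gesEvent x).2.1, (gesEvent x).2.2) := by
  obtain ⟨m, rfl⟩ := hdvd
  have h5 : PySem.Int.mod (15 * m + x) 5 = PySem.Int.mod x 5 := by
    rw [PySem.Int.mod_eq_emod_of_pos (by norm_num), PySem.Int.mod_eq_emod_of_pos (by norm_num)]
    omega
  have h3 : PySem.Int.mod (15 * m + x) 3 = PySem.Int.mod x 3 := by
    rw [PySem.Int.mod_eq_emod_of_pos (by norm_num), PySem.Int.mod_eq_emod_of_pos (by norm_num)]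
    omega
  have h3' : PySem.Int.mod (15 * m + x - 1) 3 = PySem.Int.mod (x - 1) 3 := by
    rw [PySem.Int.mod_eq_emod_of_pos (by norm_num), PySem.Int.mod_eq_emod_of_pos (by norm_num)]
    omega
  have hfd : PySem.Int.floordiv (15 * m + x) 5
      = PySem.Int.floordiv (15 * m) 5 + PySem.Int.floordiv x 5 := by
    rw [PySem.Int.floordiv_eq_ediv_of_pos (by norm_num),
        PySem.Int.floordiv_eq_ediv_of_pos (by norm_num),
        PySem.Int.floordiv_eq_ediv_of_pos (by norm_num)]
    omega
  simp only [gesEvent, h5, h3, h3', hfd, Prod.mk.injEq]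
  exact ⟨trivial, by ring, trivial⟩

-- a stretch of d indices starting after b, as a range-map
lemma ges_range_map (b : Int) (d : Nat) :
    PySem.List.pyRange (b + 1) (b + 1 + (d : Int)) 1
      = (List.range d).map (fun j : Nat => b + (1 + (j : Int))) := by
  rw [PySem.List.pyRange_one]
  have h : (b + 1 + (d : Int) - (b + 1)).toNat = d := by omega
  rw [h]
  apply List.map_congr_left
  intro j _
  ring

-- one block of B, shifted, is the next d events (d ≤ 15)
lemma ges_chunk (b : Int) (hdvd : (15 : Int) ∣ b) (d : Nat) (hd : d ≤ 15) :
    (gesBlock.take d).map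
        (fun e => (e.1, (1 + PySem.Int.floordiv b 5) + e.2.1, e.2.2))
      = (PySem.List.pyRange (b + 1) (b + 1 + (d : Int)) 1).map gesEvent := by
  rw [ges_range_map b d, ges_block_eq, ← List.map_take, List.take_range,
      Nat.min_eq_left hd, List.map_map, List.map_map]
  apply List.map_congr_left
  intro j _
  simp only [Function.comp_apply]
  rw [ges_shift b (1 + (j : Int)) hdvd]
  simp only [Prod.mk.injEq]
  exact ⟨trivial, by ring, trivial⟩

-- pyRange with step 15: nil and cons forms
lemma ges_pyRange15_nil (a b : Int) (h : b ≤ a) : PySem.List.pyRange a b 15 = [] := by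
  rw [PySem.List.pyRange_of_pos a b (by norm_num), if_neg (by omega)]
  rfl

lemma ges_pyRange15_cons (a b : Int) (h : a < b) :
    PySem.List.pyRange a b 15 = a :: PySem.List.pyRange (a + 15) b 15 := by
  rw [PySem.List.pyRange_of_pos a b (by norm_num),
      PySem.List.pyRange_of_pos (a + 15) b (by norm_num), if_pos h]
  have hN : ((b - a + 15 - 1) / 15).toNat
      = (if a + 15 < b then ((b - (a + 15) + 15 - 1) / 15).toNat else 0) + 1 := by
    split_ifs <;> omega
  rw [hN, List.range_succ_eq_map, List.map_cons, List.map_map]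
  congr 1
  · simp
  · apply List.map_congr_left
    intro j _
    simp only [Function.comp_apply]
    push_cast
    ring

-- B's tiling, from block start b on, yields the events b+1 … n (b a multiple of 15)
lemma ges_B_main (t : Nat) : ∀ (b n : Int), (15 : Int) ∣ b → n ≤ b + 15 * t →
    (PySem.List.pyRange b n 15).flatMap
        (fun c => (PySem.List.slice gesBlock none (some (n - c))).map
          (fun e => (e.1, (1 + PySem.Int.floordiv c 5) + e.2.1, e.2.2)))
      = (PySem.List.pyRange (b + 1) (n + 1) 1).map gesEvent := by
  induction t with
  | zero =>
    intro b n _ hle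
    rw [ges_pyRange15_nil b n (by omega), PySem.List.pyRange_one_eq_nil (by omega)]
    rfl
  | succ t ih =>
    intro b n hdvd hle
    by_cases hbn : b < n
    · rw [ges_pyRange15_cons b n hbn, List.flatMap_cons]
      have hd15 : (15 : Int) ∣ (b + 15) := by omega
      obtain ⟨d, hd, hdeq⟩ : ∃ d : Nat, d ≤ 15 ∧ (d : Int) = min (n - b) 15 :=
        ⟨(min (n - b) 15).toNat, by omega, by omega⟩
      have hlen : gesBlock.length = 15 := by rfl
      have hslice : PySem.List.slice gesBlock none (some (n - b)) = gesBlock.take d := by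
        rw [PySem.List.slice_to _ (by omega)]
        rcases le_or_gt (n - b) 15 with h | h
        · congr 1; omega
        · have hd' : d = 15 := by omega
          rw [List.take_of_length_le (by omega), hd',
              List.take_of_length_le (by omega)]
      have hsplit : PySem.List.pyRange (b + 15 + 1) (n + 1) 1
          = PySem.List.pyRange (b + 1 + (d : Int)) (n + 1) 1 := by
        by_cases hfull : (d : Int) = 15
        · congr 1
          omega
        · rw [PySem.List.pyRange_one_eq_nil (by omega),
              PySem.List.pyRange_one_eq_nil (by omega)]
      rw [hslice, ges_chunk b hdvd d hd, ih (b + 15) n hd15 (by omega),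
          hsplit, ← List.map_append,
          ← PySem.List.pyRange_one_append (b + 1) (b + 1 + (d : Int)) (n + 1)
            (by omega) (by omega)]
    · rw [ges_pyRange15_nil b n (by omega), PySem.List.pyRange_one_eq_nil (by omega)]
      rfl

-- B = map gesEvent
lemma ges_B_eq_map (n : Int) :
    game_event_stream_alt n = (PySem.List.pyRange 1 (n + 1) 1).map gesEvent := by
  unfold game_event_stream_alt
  rw [PySem.List.foldl_append_eq_flatMap, List.nil_append]
  by_cases hn : 0 ≤ n
  · have h := ges_B_main n.toNat 0 n ⟨0, by ring⟩ (by omega)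
    rw [show (0 : Int) + 1 = 1 from by norm_num] at h
    exact h
  · rw [ges_pyRange15_nil 0 n (by omega), PySem.List.pyRange_one_eq_nil (by omega)]
    rfl

-- ===== VERDICT (by name: the statement is the Claim_ definition above) =====
theorem game_event_stream_spec : Claim_equal_game_event_stream := by
  intro n _
  unfold Spec_game_event_stream
  rw [ges_A_eq_map, ges_B_eq_map]
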